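-- pv_equiv track=rewrite | github.com/dah4k/time-based-multigraph | mgraph.py | _encode_multigraph
-- ===== SOURCE A (Python) =====
-- from string import ascii_uppercase
-- from string import digits
--
-- ALPHABET = digits + ascii_uppercase
--
-- ALPHABET_SIZE = len(ALPHABET)
--
-- def _encode_multigraph(N: int, num: int) -> str:
--     if num == 0:
--         return "0" * N
--
--     result = ""
--     bucket = num % (ALPHABET_SIZE**N)
--     while bucket != 0:
--         bucket, index = divmod(bucket, ALPHABET_SIZE)
--         result = ALPHABET[index] + result
--
--     return result.zfill(N)
-- ===== SOURCE B (Python) =====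
-- from string import ascii_uppercase
-- from string import digits
--
-- ALPHABET = digits + ascii_uppercase
--
-- ALPHABET_SIZE = len(ALPHABET)
--
-- def _encode_multigraph(N: int, num: int) -> str:
--     bucket = num % (ALPHABET_SIZE ** N)
--     digs = []
--     for _ in range(N):
--         bucket, index = divmod(bucket, ALPHABET_SIZE)
--         digs.append(ALPHABET[index])
--     return ''.join(reversed(digs))
-- ===== Notes on version B (the rewrite author's own statement) =====
-- stated objective: simpler
-- what changed: Replaces A's value-driven `while bucket != 0` loop with its num==0 special case and trailing zfill padding by one count-driven loop of exactly N divmod steps that collects digits least-significant-first and reverses, so padding and the zero case fall out for free.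
-- outside the precondition, e.g. on _encode_multigraph(-1, 0): A returns '', B returns ''
import Mathlib
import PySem

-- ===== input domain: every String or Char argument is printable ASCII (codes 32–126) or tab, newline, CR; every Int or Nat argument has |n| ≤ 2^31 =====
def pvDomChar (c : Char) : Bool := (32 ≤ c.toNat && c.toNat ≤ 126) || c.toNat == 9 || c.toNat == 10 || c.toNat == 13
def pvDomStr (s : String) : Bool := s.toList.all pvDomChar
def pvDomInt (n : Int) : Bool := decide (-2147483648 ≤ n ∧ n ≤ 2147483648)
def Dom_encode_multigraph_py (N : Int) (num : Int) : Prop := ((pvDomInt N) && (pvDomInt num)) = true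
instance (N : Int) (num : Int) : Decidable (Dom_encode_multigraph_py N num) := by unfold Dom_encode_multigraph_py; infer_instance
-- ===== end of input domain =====

-- B replaces A's value-driven `while bucket != 0` loop plus num==0 special case and trailing
-- zfill by a single count-driven pass of exactly N divmod steps collected LSD-first and
-- reversed (objective: simpler; no claim of speed).

-- ===== PORT A =====
-- ALPHABET = digits + ascii_uppercase
def pvAlphabet : List Char :=
  ['0','1','2','3','4','5','6','7','8','9',
   'A','B','C','D','E','F','G','H','I','J','K','L','M',
   'N','O','P','Q','R','S','T','U','V','W','X','Y','Z']

-- A's `while bucket != 0: bucket, index = divmod(bucket, 36); result = ALPHABET[index] + result`.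
-- At every call bucket = num % 36**N ≥ 0, so the `≤ 0` guard coincides with Python's `!= 0`;
-- it only makes the recursion total (termination).  ALPHABET[index] with 0 ≤ index < 36 is
-- always in range, ported as the total pyGetD form.
def pvLoopA (bucket : Int) (result : List Char) : List Char :=
  if bucket ≤ 0 then result
  else pvLoopA (PySem.Int.floordiv bucket 36)
       (PySem.List.pyGetD pvAlphabet (PySem.Int.mod bucket 36) '0' :: result)
termination_by bucket.toNat
decreasing_by
  rename_i h
  rw [PySem.Int.floordiv_eq_ediv_of_pos (by norm_num)]
  omega

-- 36**N ported as 36 ^ N.toNat : under Pre_ (0 ≤ N) this is exactly Python's int power.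
def encode_multigraph_py (N : Int) (num : Int) : String :=
  if num = 0 then String.ofList (List.replicate N.toNat '0')   -- "0" * N
  else String.ofList (PySem.Chars.zfill
        (pvLoopA (PySem.Int.mod num ((36 : Int) ^ N.toNat)) []) N)

-- ===== PORT B =====
-- `for _ in range(N): bucket, index = divmod(bucket, 36); digs.append(ALPHABET[index])`
def pvLoopB : Nat → Int → List Char → List Char
  | 0, _, digs => digs
  | k + 1, bucket, digs =>
      pvLoopB k (PySem.Int.floordiv bucket 36)
        (digs ++ [PySem.List.pyGetD pvAlphabet (PySem.Int.mod bucket 36) '0'])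

def encode_multigraph_py_alt (N : Int) (num : Int) : String :=
  String.ofList (pvLoopB N.toNat (PySem.Int.mod num ((36 : Int) ^ N.toNat)) []).reverse

-- ===== PRECONDITION & SPEC =====
-- Pre_ excludes N < 0: there Python's 36**N is a float, so A raises TypeError whenever
-- num ≠ 0; the only excluded inputs on which A returns are (N < 0, num = 0), where
-- "0" * N gives "" and B also returns "".
def Pre_encode_multigraph_py (N : Int) (num : Int) : Prop := 0 ≤ N
instance (N : Int) (num : Int) : Decidable (Pre_encode_multigraph_py N num) := by
  unfold Pre_encode_multigraph_py; infer_instance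
def pvWitness_encode_multigraph_py : Int × Int := (3, 1295)

def Spec_encode_multigraph_py (N : Int) (num : Int) (out : String) : Prop := out = encode_multigraph_py_alt N num
instance (N : Int) (num : Int) (out : String) : Decidable (Spec_encode_multigraph_py N num out) := by unfold Spec_encode_multigraph_py; infer_instance

-- ===== CLAIM (what is proved, stated in full; the proofs are below) =====
def Claim_equal_encode_multigraph_py : Prop := ∀ (N : Int) (num : Int), Dom_encode_multigraph_py N num → Pre_encode_multigraph_py N num → Spec_encode_multigraph_py N num (encode_multigraph_py N num)

-- ===== LEMMAS AND PROOFS =====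

-- A's loop is accumulator-prepending: splitting off the accumulator.
theorem pvLoopA_append_aux (n : Nat) : ∀ (b : Int), b.toNat ≤ n → ∀ res, pvLoopA b res = pvLoopA b [] ++ res := by
  induction n with
  | zero =>
      intro b hb res
      have h : b ≤ 0 := by omega
      rw [pvLoopA, if_pos h, pvLoopA, if_pos h]
      simp
  | succ n ih =>
      intro b hb res
      by_cases h : b ≤ 0
      · rw [pvLoopA, if_pos h, pvLoopA, if_pos h]; simp
      · have hlt : (PySem.Int.floordiv b 36).toNat ≤ n := by
          rw [PySem.Int.floordiv_eq_ediv_of_pos (by norm_num)]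
          omega
        conv_lhs => rw [pvLoopA]
        conv_rhs => rw [pvLoopA]
        rw [if_neg h, if_neg h, ih _ hlt [_], ih _ hlt (_ :: res)]
        simp

theorem pvLoopA_append (b : Int) (res : List Char) :
    pvLoopA b res = pvLoopA b [] ++ res :=
  pvLoopA_append_aux b.toNat b le_rfl res

-- B's loop is accumulator-appending: splitting off the accumulator.
theorem pvLoopB_append (k : Nat) (bucket : Int) (digs : List Char) :
    pvLoopB k bucket digs = digs ++ pvLoopB k bucket [] := by
  induction k generalizing bucket digs with
  | zero => simp [pvLoopB]
  | succ k ih =>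
      rw [pvLoopB, pvLoopB,
        ih (PySem.Int.floordiv bucket 36) ([] ++ [_]),
        ih (PySem.Int.floordiv bucket 36) (digs ++ [_])]
      simp

theorem pvLoopB_length (k : Nat) : ∀ b : Int, (pvLoopB k b []).length = k := by
  induction k with
  | zero => intro b; rfl
  | succ k ih =>
      intro b
      rw [pvLoopB, pvLoopB_append]
      simp [ih]

theorem pvLoopB_zero (k : Nat) : pvLoopB k 0 [] = List.replicate k '0' := by
  induction k with
  | zero => rfl
  | succ k ih =>
      rw [pvLoopB, pvLoopB_append]
      have h1 : PySem.Int.floordiv 0 36 = 0 := by decide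
      have h2 : PySem.List.pyGetD pvAlphabet (PySem.Int.mod 0 36) '0' = '0' := by decide
      rw [h1, h2, ih]
      simp [List.replicate_succ]

-- the character A/B pick in one step is in the alphabet (the index 0 ≤ b % 36 < 36 is in range)
theorem pvDigit_mem (b : Int) :
    PySem.List.pyGetD pvAlphabet (PySem.Int.mod b 36) '0' ∈ pvAlphabet := by
  apply PySem.List.pyGetD_mem
  have h1 := PySem.Int.mod_nonneg b (b := 36) (by norm_num)
  have h2 := PySem.Int.mod_lt b (b := 36) (by norm_num)
  have hl : pvAlphabet.length = 36 := by decide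
  simp only [PySem.Raise.InRange, hl]
  omega

-- every character A's loop emits comes from the alphabet (no sign characters)
theorem pvLoopA_chars_aux (n : Nat) : ∀ (b : Int), b.toNat ≤ n → ∀ res,
    (∀ c ∈ res, c ∈ pvAlphabet) → ∀ c ∈ pvLoopA b res, c ∈ pvAlphabet := by
  induction n with
  | zero =>
      intro b hb res hres
      have h : b ≤ 0 := by omega
      rw [pvLoopA, if_pos h]
      exact hres
  | succ n ih =>
      intro b hb res hres
      by_cases h : b ≤ 0
      · rw [pvLoopA, if_pos h]; exact hres
      · have hlt : (PySem.Int.floordiv b 36).toNat ≤ n := by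
          rw [PySem.Int.floordiv_eq_ediv_of_pos (by norm_num)]
          omega
        rw [pvLoopA, if_neg h]
        apply ih _ hlt
        intro c hc
        rcases List.mem_cons.mp hc with hc | hc
        · subst hc; exact pvDigit_mem b
        · exact hres c hc

theorem pvLoopA_chars (b : Int) : ∀ c ∈ pvLoopA b [], c ∈ pvAlphabet :=
  pvLoopA_chars_aux b.toNat b le_rfl [] (by simp)

theorem no_sign_of_alphabet {c : Char} (h : c ∈ pvAlphabet) : ¬(c = '+' ∨ c = '-') := by
  have hall : pvAlphabet.all (fun c => !(c == '+' || c == '-')) = true := by decide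
  have hc := List.all_eq_true.mp hall c h
  simp at hc
  tauto

-- zfill on a sign-free string is plain left padding with zeros
theorem zfill_nosign (cs : List Char) (w : Int)
    (h : ∀ c ∈ cs, ¬(c = '+' ∨ c = '-')) :
    PySem.Chars.zfill cs w = List.replicate (w.toNat - cs.length) '0' ++ cs := by
  rw [PySem.Chars.zfill.eq_def]
  split
  · rename_i hle
    have : w.toNat ≤ cs.length := by omega
    simp [Nat.sub_eq_zero_of_le this]
  · rename_i hgt
    match cs with
    | [] => simp
    | c :: rest =>
        have hc := h c (List.mem_cons_self ..)
        simp only [if_neg hc]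

-- main invariant: zero-filling A's digits of b to width k is exactly B's k-step output reversed
theorem pv_main (k : Nat) : ∀ b : Int, 0 ≤ b → b < (36 : Int) ^ k →
    PySem.Chars.zfill (pvLoopA b []) (k : Int) = (pvLoopB k b []).reverse := by
  induction k with
  | zero =>
      intro b hb hlt
      rw [pow_zero] at hlt
      have hb0 : b = 0 := by omega
      subst hb0
      rw [pvLoopA, if_pos le_rfl]
      decide
  | succ k ih =>
      intro b hb hlt
      rcases eq_or_lt_of_le hb with hb0 | hbpos
      · -- b = 0 : all-zero string on both sides
        subst hb0
        rw [pvLoopA, if_pos le_rfl]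
        rw [zfill_nosign _ _ (by simp)]
        rw [pvLoopB, pvLoopB_append]
        have h1 : PySem.Int.floordiv 0 36 = 0 := by decide
        have h2 : PySem.List.pyGetD pvAlphabet (PySem.Int.mod 0 36) '0' = '0' := by decide
        rw [h1, h2, pvLoopB_zero]
        simp [List.replicate_succ']
      · -- b > 0 : peel the last digit on both sides
        set b' := PySem.Int.floordiv b 36 with hb'
        set d := PySem.List.pyGetD pvAlphabet (PySem.Int.mod b 36) '0' with hd
        have hApos : pvLoopA b [] = pvLoopA b' [] ++ [d] := by
          rw [pvLoopA, if_neg (by omega), pvLoopA_append]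
        have hb'0 : 0 ≤ b' := by
          rw [hb', PySem.Int.floordiv_eq_ediv_of_pos (by norm_num)]
          exact Int.ediv_nonneg hb (by norm_num)
        have hb'lt : b' < (36 : Int) ^ k := by
          rw [hb', PySem.Int.floordiv_eq_ediv_of_pos (by norm_num)]
          rw [Int.ediv_lt_iff_lt_mul (by norm_num)]
          calc b < 36 ^ (k + 1) := hlt
            _ = 36 ^ k * 36 := by ring
        have hIH := ih b' hb'0 hb'lt
        have hchars := pvLoopA_chars b'
        have hnosign : ∀ c ∈ pvLoopA b' [], ¬(c = '+' ∨ c = '-') :=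
          fun c hc => no_sign_of_alphabet (hchars c hc)
        rw [zfill_nosign _ _ hnosign] at hIH
        have hlenA : (pvLoopA b' []).length ≤ k := by
          have hlen := congrArg List.length hIH
          simp [pvLoopB_length] at hlen
          omega
        rw [hApos,
          zfill_nosign _ _ (by
            intro c hc
            rcases List.mem_append.mp hc with hc | hc
            · exact hnosign c hc
            · simp only [List.mem_singleton] at hc
              subst hc
              exact no_sign_of_alphabet (pvDigit_mem b))]
        rw [pvLoopB, pvLoopB_append, ← hb', ← hd]
        simp only [List.reverse_cons, Int.toNat_natCast, List.length_append,
          List.length_singleton] at hIH ⊢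
        have hsub : k + 1 - ((pvLoopA b' []).length + 1) = k - (pvLoopA b' []).length := by
          omega
        rw [hsub, ← List.append_assoc, hIH]
        simp

-- ===== VERDICT (by name: the statement is the Claim_ definition above) =====
theorem encode_multigraph_py_spec : Claim_equal_encode_multigraph_py := by
  intro N num _ hPre
  unfold Spec_encode_multigraph_py encode_multigraph_py encode_multigraph_py_alt
  have hM : (0 : Int) < 36 ^ N.toNat := by positivity
  have hN : ((N.toNat : Int)) = N := Int.toNat_of_nonneg hPre
  by_cases h0 : num = 0
  · subst h0
    have hmod : PySem.Int.mod 0 ((36 : Int) ^ N.toNat) = 0 := by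
      rw [PySem.Int.mod_eq_emod_of_pos hM]; simp
    rw [if_pos rfl, hmod, pvLoopB_zero]
    simp
  · rw [if_neg h0, ← hN]
    exact congrArg String.ofList
      (pv_main N.toNat _ (PySem.Int.mod_nonneg _ hM) (PySem.Int.mod_lt _ hM))
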